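-- pv_equiv track=rewrite | github.com/yutaro0915/Q-APP-V2 | backend/app/services/reactions_service.py | _is_valid_comment_id
-- ===== SOURCE A (Python) =====
-- def _is_valid_comment_id(comment_id: str) -> bool:
--     """Validate comment ID format.
--
--     Args:
--         comment_id: Comment ID to validate
--
--     Returns:
--         True if valid, False otherwise
--     """
--     # Comment ID must match format: cmt_{26 char ULID}
--     if not comment_id or not comment_id.startswith("cmt_"):
--         return False
--
--     ulid_part = comment_id[4:]  # Remove "cmt_" prefix
--
--     # ULID must be exactly 26 characters
--     if len(ulid_part) != 26:
--         return False
--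
--     # ULID uses specific character set (Crockford's base32, no I, L, O, U)
--     valid_chars = set("0123456789ABCDEFGHJKMNPQRSTVWXYZ")
--     return all(c in valid_chars for c in ulid_part)
-- ===== SOURCE B (Python) =====
-- import re
--
-- # "cmt_" + 26 Crockford base32 chars (0-9, A-Z without I, L, O, U),
-- # expressed as one anchored regular expression and delegated to the re engine.
-- _COMMENT_ID_RE = re.compile(r'cmt_[0-9A-HJKMNP-TV-Z]{26}')
--
--
-- def _is_valid_comment_id(comment_id: str) -> bool:
--     """Validate comment ID format."""
--     return _COMMENT_ID_RE.fullmatch(comment_id) is not None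
-- ===== Notes on version B (the rewrite author's own statement) =====
-- stated objective: idiomatic
-- what changed: Replaced A's explicit prefix test, slice, length check and per-character set-membership scan with a single anchored regular expression (re.fullmatch of cmt_[0-9A-HJKMNP-TV-Z]{26}) executed by the regex engine; the Lean port of B is a token-list pattern matcher driven by that pattern.
import Mathlib
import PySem

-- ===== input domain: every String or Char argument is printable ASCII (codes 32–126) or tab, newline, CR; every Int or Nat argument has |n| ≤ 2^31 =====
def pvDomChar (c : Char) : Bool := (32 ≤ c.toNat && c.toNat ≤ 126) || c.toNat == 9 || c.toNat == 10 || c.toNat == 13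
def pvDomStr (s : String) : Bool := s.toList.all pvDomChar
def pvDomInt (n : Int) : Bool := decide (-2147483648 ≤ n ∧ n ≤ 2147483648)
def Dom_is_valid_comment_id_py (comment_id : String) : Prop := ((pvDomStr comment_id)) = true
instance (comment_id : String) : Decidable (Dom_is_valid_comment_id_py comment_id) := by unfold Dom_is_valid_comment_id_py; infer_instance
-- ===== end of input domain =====

-- B replaces A's prefix test + slice + length check + set-membership scan with one anchored
-- regular expression, re.fullmatch(r'cmt_[0-9A-HJKMNP-TV-Z]{26}'); the port runs that
-- pattern as a token-list matcher (objective: idiomatic).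

-- ===== PORT A =====
-- valid_chars = set("0123456789ABCDEFGHJKMNPQRSTVWXYZ")
def pvValidChars : PySem.Set Char := PySem.Set.ofList "0123456789ABCDEFGHJKMNPQRSTVWXYZ".toList

def is_valid_comment_id_py (comment_id : String) : Bool :=
  let s := comment_id.toList
  -- if not comment_id or not comment_id.startswith("cmt_"): return False
  if s.isEmpty || !(PySem.Chars.startswith s "cmt_".toList) then false
  else
    -- ulid_part = comment_id[4:]
    let ulid := PySem.Chars.slice s (some 4) none
    -- if len(ulid_part) != 26: return False
    if ulid.length ≠ 26 then false
    -- return all(c in valid_chars for c in ulid_part)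
    else ulid.all (fun c => pvValidChars.contains c)

-- ===== PORT B =====
-- the regex r'cmt_[0-9A-HJKMNP-TV-Z]{26}' compiled to a token list: four literals, then the
-- character class repeated 26 times (no re counterpart in PySem, so the engine is hand-written:
-- fullmatch consumes tokens and characters in lockstep, anchored at both ends — exact)
inductive PvTok where
  | lit : Char → PvTok
  | cls : PvTok
deriving DecidableEq, Repr

def pvPattern : List PvTok :=
  [PvTok.lit 'c', PvTok.lit 'm', PvTok.lit 't', PvTok.lit '_'] ++ List.replicate 26 PvTok.cls

-- [0-9A-HJKMNP-TV-Z] : the ranges exactly as written in the regex character class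
def pvTokMatch : PvTok → Char → Bool
  | PvTok.lit l, c => c == l
  | PvTok.cls, c =>
      (decide ('0' ≤ c) && decide (c ≤ '9')) ||
      (decide ('A' ≤ c) && decide (c ≤ 'H')) ||
      (decide ('J' ≤ c) && decide (c ≤ 'K')) ||
      (decide ('M' ≤ c) && decide (c ≤ 'N')) ||
      (decide ('P' ≤ c) && decide (c ≤ 'T')) ||
      (decide ('V' ≤ c) && decide (c ≤ 'Z'))

-- re.fullmatch: the whole string must be consumed by the whole pattern
def pvFullmatch : List PvTok → List Char → Bool
  | [], [] => true
  | [], _ :: _ => false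
  | _ :: _, [] => false
  | t :: ts, c :: cs => pvTokMatch t c && pvFullmatch ts cs

def is_valid_comment_id_py_alt (comment_id : String) : Bool :=
  pvFullmatch pvPattern comment_id.toList

-- ===== PRECONDITION & SPEC =====
def Spec_is_valid_comment_id_py (comment_id : String) (out : Bool) : Prop := out = is_valid_comment_id_py_alt comment_id
instance (comment_id : String) (out : Bool) : Decidable (Spec_is_valid_comment_id_py comment_id out) := by unfold Spec_is_valid_comment_id_py; infer_instance

-- ===== CLAIM (what is proved, stated in full; the proofs are below) =====
def Claim_equal_is_valid_comment_id_py : Prop := ∀ (comment_id : String), Dom_is_valid_comment_id_py comment_id → Spec_is_valid_comment_id_py comment_id (is_valid_comment_id_py comment_id)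

-- ===== LEMMAS AND PROOFS =====

-- Char order/equality expressed on code points, so omega can reason about the alphabet
theorem pv_char_le (c d : Char) : (d ≤ c) = (d.toNat ≤ c.toNat) := propext ⟨fun h => h, fun h => h⟩
theorem pv_char_eqn (c d : Char) : (c = d) = (c.toNat = d.toNat) :=
  propext ⟨congrArg _, fun h => Char.ext (UInt32.toNat_inj.mp h)⟩

-- A's alphabet set and the regex character class accept exactly the same characters
theorem pv_char_eq (c : Char) :
    pvValidChars.contains c = pvTokMatch PvTok.cls c := by
  have hval : pvValidChars = ['0','1','2','3','4','5','6','7','8','9','A','B','C','D','E','F','G','H','J','K','M','N','P','Q','R','S','T','V','W','X','Y','Z'] := by decide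
  rw [Bool.eq_iff_iff, hval]
  simp only [pvTokMatch, PySem.Set.contains, List.contains_cons, List.contains_nil,
    Bool.or_eq_true, Bool.and_eq_true, decide_eq_true_eq, beq_iff_eq,
    pv_char_le c, pv_char_le _ c, pv_char_eqn c, Char.reduceToNat,
    Bool.false_eq_true, or_false]
  omega

-- the repeated character class matches exactly the strings of that length over the class
theorem pv_fm_rep (n : Nat) (cs : List Char) :
    pvFullmatch (List.replicate n PvTok.cls) cs =
      (decide (cs.length = n) && cs.all (pvTokMatch PvTok.cls)) := by
  induction n generalizing cs with
  | zero => cases cs <;> simp [pvFullmatch]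
  | succ k ih =>
    cases cs with
    | nil => simp [List.replicate_succ, pvFullmatch]
    | cons x xs =>
      rw [List.replicate_succ]
      simp only [pvFullmatch, List.all_cons, ih xs, List.length_cons]
      by_cases h : xs.length = k
      · simp [h]
      · simp [h]

theorem is_valid_comment_id_py_spec_aux (s : String) :
    is_valid_comment_id_py s = is_valid_comment_id_py_alt s := by
  unfold is_valid_comment_id_py is_valid_comment_id_py_alt
  have hpat : pvPattern = PvTok.lit 'c' :: PvTok.lit 'm' :: PvTok.lit 't' :: PvTok.lit '_' ::
      List.replicate 26 PvTok.cls := rfl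
  rw [hpat]
  generalize s.toList = l
  match l with
  | [] => rfl
  | [a] => simp [PySem.Chars.startswith, pvFullmatch]
  | [a, b] => simp [PySem.Chars.startswith, pvFullmatch]
  | [a, b, c] => simp [PySem.Chars.startswith, pvFullmatch]
  | a :: b :: c :: d :: rest =>
    have hfm : pvFullmatch (PvTok.lit 'c' :: PvTok.lit 'm' :: PvTok.lit 't' :: PvTok.lit '_' ::
        List.replicate 26 PvTok.cls) (a :: b :: c :: d :: rest) =
        ((a == 'c') && ((b == 'm') && ((c == 't') && ((d == '_') &&
          (decide (rest.length = 26) && rest.all (pvTokMatch PvTok.cls)))))) := by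
      simp only [pvFullmatch, pvTokMatch, pv_fm_rep]
    rw [hfm]
    by_cases hp : ("cmt_".toList <+: a :: b :: c :: d :: rest)
    · have hsw : PySem.Chars.startswith (a :: b :: c :: d :: rest) "cmt_".toList = true :=
        (PySem.Chars.startswith_iff _ _).mpr hp
      have hcmt : "cmt_".toList = ['c','m','t','_'] := by decide
      rw [hcmt] at hp hsw
      have hpre : a = 'c' ∧ b = 'm' ∧ c = 't' ∧ d = '_' := by
        simp only [List.cons_prefix_cons] at hp
        exact ⟨hp.1.symm, hp.2.1.symm, hp.2.2.1.symm, hp.2.2.2.1.symm⟩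
      obtain ⟨rfl, rfl, rfl, rfl⟩ := hpre
      rw [if_neg (by simp [hsw])]
      have hsl : PySem.Chars.slice ('c'::'m'::'t'::'_'::rest) (some 4) none = rest := by
        simp [pysem]
      rw [hsl]
      by_cases hl : rest.length = 26
      · rw [if_neg (by omega)]
        simp only [pv_char_eq, hl, beq_self_eq_true, decide_true, Bool.true_and]
      · rw [if_pos (by omega)]
        simp [hl]
    · have hsw : PySem.Chars.startswith (a :: b :: c :: d :: rest) "cmt_".toList = false := by
        rw [Bool.eq_false_iff]; intro h; exact hp ((PySem.Chars.startswith_iff _ _).mp h)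
      have hcmt : "cmt_".toList = ['c','m','t','_'] := by decide
      rw [hcmt] at hsw
      rw [if_pos (by simp [hsw])]
      have hnp : ¬ (a = 'c' ∧ b = 'm' ∧ c = 't' ∧ d = '_') := by
        rintro ⟨rfl, rfl, rfl, rfl⟩
        exact hp ⟨rest, by rw [hcmt]; rfl⟩
      by_cases h1 : a = 'c' <;> by_cases h2 : b = 'm' <;> by_cases h3 : c = 't' <;>
        by_cases h4 : d = '_' <;> simp [h1, h2, h3, h4] <;> tauto

-- ===== VERDICT (by name: the statement is the Claim_ definition above) =====
theorem is_valid_comment_id_py_spec : Claim_equal_is_valid_comment_id_py := by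
  intro s _
  exact is_valid_comment_id_py_spec_aux s
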